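-- pv_equiv track=rewrite | github.com/ronny-toribio/DyeGapAdjustmentTool | dgat2.py | validate_gap_value
-- ===== SOURCE A (Python) =====
-- GAP_VALUE_RANGE = [-200, -192, -184, -176, -168, -160, -152, -144, -136, -128, -120, -112, -104, -96, -88, -80, -72, -64, -56, -48, -40, -32, -24, -16, -8, 0, 8, 16, 24, 32, 40, 48, 56, 64, 72, 80, 88, 96, 104, 112, 120, 128, 136, 144, 152, 160, 168, 176, 184, 192, 200]
--
-- def validate_gap_value(num):
--    try:
--       num = int(num)
--    except:
--       return 0
--    if num in GAP_VALUE_RANGE: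
--       return num
--    if num > 200:
--       return 200
--    if num < -200:
--       return -200
--    for i in GAP_VALUE_RANGE:
--       if i > num:
--          return i
-- ===== SOURCE B (Python) =====
-- def validate_gap_value(num):
--     try:
--         num = int(num)
--     except:
--         return 0
--     r = ((num + 7) // 8) * 8
--     if r > 200:
--         return 200
--     if r < -200:
--         return -200
--     return r
-- ===== Notes on version B (the rewrite author's own statement) =====
-- stated objective: simpler
-- what changed: Replaces the membership test on the 51-element grid list and the linear scan for the next grid value with a closed-form ceiling-to-multiple-of-8 followed by a clamp to [-200, 200].
import Mathlib
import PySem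

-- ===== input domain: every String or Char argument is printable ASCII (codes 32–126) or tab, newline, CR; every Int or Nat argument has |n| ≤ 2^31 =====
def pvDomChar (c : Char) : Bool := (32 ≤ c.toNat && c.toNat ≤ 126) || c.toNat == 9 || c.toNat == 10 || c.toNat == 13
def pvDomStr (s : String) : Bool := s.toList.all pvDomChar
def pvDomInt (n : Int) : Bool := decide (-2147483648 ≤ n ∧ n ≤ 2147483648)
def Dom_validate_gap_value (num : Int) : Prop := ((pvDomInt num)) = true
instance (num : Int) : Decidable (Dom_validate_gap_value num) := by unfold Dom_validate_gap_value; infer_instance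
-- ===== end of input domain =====

-- ===== PORT A =====
def GAP_VALUE_RANGE : List Int := [-200, -192, -184, -176, -168, -160, -152, -144, -136, -128, -120, -112, -104, -96, -88, -80, -72, -64, -56, -48, -40, -32, -24, -16, -8, 0, 8, 16, 24, 32, 40, 48, 56, 64, 72, 80, 88, 96, 104, 112, 120, 128, 136, 144, 152, 160, 168, 176, 184, 192, 200]

-- the final 'for' loop: return the first list element strictly greater than num;
-- falling off the loop (Python would return None) is unreachable on the branch that reaches it
def validate_gap_value_loop (num : Int) : List Int -> Int
  | [] => 0
  | i :: rest => if i > num then i else validate_gap_value_loop num rest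

def validate_gap_value (num : Int) : Int :=
  if num ∈ GAP_VALUE_RANGE then num
  else if num > 200 then 200
  else if num < -200 then -200
  else validate_gap_value_loop num GAP_VALUE_RANGE

-- ===== PORT B =====
-- one honest line: B snaps num up to the next multiple of 8 in closed form and clamps to [-200, 200] (simpler, no list scan)
def validate_gap_value_alt (num : Int) : Int :=
  let r := (PySem.Int.floordiv (num + 7) 8) * 8
  if r > 200 then 200
  else if r < -200 then -200
  else r

-- ===== PRECONDITION & SPEC =====
def Spec_validate_gap_value (num : Int) (out : Int) : Prop := out = validate_gap_value_alt num
instance (num : Int) (out : Int) : Decidable (Spec_validate_gap_value num out) := by unfold Spec_validate_gap_value; infer_instance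

-- ===== CLAIM (what is proved, stated in full; the proofs are below) =====
def Claim_equal_validate_gap_value : Prop := ∀ (num : Int), Dom_validate_gap_value num → Spec_validate_gap_value num (validate_gap_value num)

-- ===== LEMMAS AND PROOFS =====

-- ===== VERDICT (by name: the statement is the Claim_ definition above) =====
-- A = B on every value in [-200, 200], checked exhaustively
set_option maxRecDepth 4000 in
lemma core (n : Nat) (h : n < 401) :
    validate_gap_value ((n : Int) - 200) = validate_gap_value_alt ((n : Int) - 200) := by
  revert h
  revert n
  decide

theorem validate_gap_value_spec : Claim_equal_validate_gap_value := by
  intro num _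
  unfold Spec_validate_gap_value
  by_cases hlo : -200 ≤ num
  · by_cases hhi : num ≤ 200
    · have h1 : ((num + 200).toNat : Int) - 200 = num := by omega
      have h2 : (num + 200).toNat < 401 := by omega
      have := core (num + 200).toNat h2
      rw [h1] at this
      exact this
    · -- num > 200: A takes the 'num > 200' branch; B's r > 200
      have hmem : num ∉ GAP_VALUE_RANGE := by
        simp only [GAP_VALUE_RANGE, List.mem_cons, List.not_mem_nil]
        push Not
        simp only [and_true]
        omega
      have hfd : PySem.Int.floordiv (num + 7) 8 = (num + 7) / 8 :=
        PySem.Int.floordiv_eq_ediv_of_pos (by omega)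
      simp only [validate_gap_value, validate_gap_value_alt, hmem, if_false, hfd]
      rw [if_pos (by omega)]
      rw [if_pos (by omega)]
  · -- num < -200: A takes the 'num < -200' branch; B's r ≤ -200 (and ≥ -200 never, r = -200 only at num ∈ (-207,-200])
    have hmem : num ∉ GAP_VALUE_RANGE := by
      simp only [GAP_VALUE_RANGE, List.mem_cons, List.not_mem_nil]
      push Not
      simp only [and_true]
      omega
    have hfd : PySem.Int.floordiv (num + 7) 8 = (num + 7) / 8 :=
      PySem.Int.floordiv_eq_ediv_of_pos (by omega)
    simp only [validate_gap_value, validate_gap_value_alt, hmem, if_false, hfd]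
    rw [if_neg (by omega), if_pos (by omega), if_neg (by omega)]
    by_cases hr : (num + 7) / 8 * 8 < -200
    · rw [if_pos hr]
    · rw [if_neg hr]
      omega
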